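-- pv_equiv track=rewrite | github.com/derrickdollesin/DSC20 | DSC20/Homework/hw02/hw02.py | shopping
-- ===== SOURCE A (Python) =====
-- def shopping(grocery_bag):
--     """
--     Iterates through a dictionary and returns a list of unique foods items in
--     the dictionary.
--
--     Args:
--         grocery_bag: a dictionary where each key is the name of the store and
--         each value is a list of foods purchased from that store
--
--     Returns:
--         a list of unique foods from the dictionary list, sorted alphabetically
--
--
--     >>> bag = {'shop1': ['Munchi', 'Chirp'], 'shop2': ['Blipz', 'Sprova']}
--     >>> shopping(bag)
--     ['Blipz', 'Chirp', 'Munchi', 'Sprova']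
--     >>> bag = {'shop1': ['Munchi', 'Chirp'], 'shop2': ['Munchi', 'Sprova']}
--     >>> shopping(bag)
--     ['Chirp', 'Munchi', 'Sprova']
--     >>> bag = {'shop1': ['Munchi', 'Chirp', 'Blipz'], \
--     'shop2': ['Munchi', 'Sprova', 'Sprova'], \
--     'shop3': ['Blipz', 'Sprova', 'Eggs']}
--     >>> shopping(bag)
--     ['Blipz', 'Chirp', 'Eggs', 'Munchi', 'Sprova']
--
--     # Add at least 3 doctests below here #
--
--     >>> bag = {"shop1": ['Munchi', 'egg', 'chirp'], \
--     "shop2": ['Egg', 'Chirp', 'Blipz'], \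
--     "shop3": ['blipz', 'egg', 'Blipz']}
--     >>> shopping(bag)
--     ['Blipz', 'Chirp', 'Egg', 'Munchi']
--
--     >>> bag = {}
--     >>> shopping(bag)
--     []
--
--     >>> bag = {}
--     >>> shopping(bag)
--     []
--
--     """
--     # YOUR CODE GOES HERE #
--
--     # initialize important variables and output
--     output = []
--     foods = list(grocery_bag.values())
--
--     # create a list of only foods from the dictionary
--     for food in foods:
--         title_foods = []
--
--         # turn the foods into title case
--         for i in food:
--             title_foods.append(i.title())
--
--         # append the foods to output
--         output = output + title_foods
--
--     # sort output in alphabetical order and remove duplicates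
--     output = sorted(list(set(output)))
--
--     # return output list
--     return output
-- ===== SOURCE B (Python) =====
-- def shopping(grocery_bag):
--     # Flatten all store lists into one title-cased list (duplicates kept),
--     # sort the whole thing, then one linear pass drops adjacent duplicates.
--     items = []
--     for foods in grocery_bag.values():
--         for f in foods:
--             items.append(f.title())
--     items.sort()
--     result = []
--     for food in items:
--         if result[-1:] != [food]:
--             result.append(food)
--     return result
-- ===== Notes on version B (the rewrite author's own statement) =====
-- stated objective: faster
-- what changed: Replaces hash-set deduplication of a list built by repeated quadratic list concatenation with appending into one flattened title-cased list, sorting it, and removing adjacent duplicates in a single linear scan comparing each element to the last appended one.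
import Mathlib
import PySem

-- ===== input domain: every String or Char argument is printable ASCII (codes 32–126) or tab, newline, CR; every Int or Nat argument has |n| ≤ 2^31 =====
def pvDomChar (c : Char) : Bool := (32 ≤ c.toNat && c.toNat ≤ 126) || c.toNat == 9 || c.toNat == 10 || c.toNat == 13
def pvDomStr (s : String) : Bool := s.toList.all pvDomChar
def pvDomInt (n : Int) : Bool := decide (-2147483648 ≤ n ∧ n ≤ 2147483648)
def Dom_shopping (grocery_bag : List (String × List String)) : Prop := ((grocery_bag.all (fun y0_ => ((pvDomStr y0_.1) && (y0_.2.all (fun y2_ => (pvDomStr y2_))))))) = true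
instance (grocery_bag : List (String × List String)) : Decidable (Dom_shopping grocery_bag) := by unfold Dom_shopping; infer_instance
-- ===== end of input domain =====

-- B appends into one flattened title-cased list, sorts it, and drops adjacent duplicates in
-- one linear pass, avoiding A's quadratic repeated list concatenation and its hash-set
-- deduplication (objective: faster, measured).

-- str.title(), exact on ASCII (the stated domain): a letter is uppercased after a
-- non-letter and lowercased after a letter; non-letters pass through and reset the flag.
def pyTitleChars (prevCased : Bool) : List Char → List Char
  | [] => []
  | c :: cs =>
      if PySem.Str.isalpha c then
        (if prevCased then c.toLower else c.toUpper) :: pyTitleChars true cs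
      else
        c :: pyTitleChars false cs

def pyTitle (s : String) : String := String.ofList (pyTitleChars false s.toList)

-- ===== PORT A =====
def shopping (grocery_bag : List (String × List String)) : List String :=
  -- foods = list(grocery_bag.values())
  let foods := grocery_bag.map Prod.snd
  -- for food in foods: title_foods = []; for i in food: title_foods.append(i.title()); output = output + title_foods
  let output := foods.foldl
    (fun output food => output ++ food.foldl (fun tf i => tf ++ [pyTitle i]) []) []
  -- output = sorted(list(set(output)))
  PySem.List.sorted (PySem.Set.ofList output) (fun x => x)

-- ===== PORT B =====
def shopping_alt (grocery_bag : List (String × List String)) : List String :=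
  -- items = flattened title-cased foods, then items.sort()
  let items := PySem.List.sorted
    (((grocery_bag.map Prod.snd).flatMap (fun foods => foods.map pyTitle))) (fun x => x)
  -- for food in items: if result[-1:] != [food]: result.append(food)
  items.foldl
    (fun result food => if result.getLast? ≠ some food then result ++ [food] else result) []

-- ===== PRECONDITION & SPEC =====
def Spec_shopping (grocery_bag : List (String × List String)) (out : List String) : Prop := out = shopping_alt grocery_bag
instance (grocery_bag : List (String × List String)) (out : List String) : Decidable (Spec_shopping grocery_bag out) := by unfold Spec_shopping; infer_instance

-- ===== CLAIM (what is proved, stated in full; the proofs are below) =====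
def Claim_equal_shopping : Prop := ∀ (grocery_bag : List (String × List String)), Dom_shopping grocery_bag → Spec_shopping grocery_bag (shopping grocery_bag)

-- ===== LEMMAS AND PROOFS =====

-- the adjacent-duplicate pass, as a structural recursion carrying the last kept element
def dedupFrom : Option String → List String → List String
  | _, [] => []
  | p, x :: xs => if p = some x then dedupFrom p xs else x :: dedupFrom (some x) xs

theorem foldl_dedupFrom (s : List String) : ∀ (acc : List String),
    s.foldl (fun result food => if result.getLast? ≠ some food then result ++ [food] else result) acc
      = acc ++ dedupFrom acc.getLast? s := by
  induction s with
  | nil => intro acc; simp [dedupFrom]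
  | cons x xs ih =>
      intro acc
      rw [List.foldl_cons]
      by_cases h : acc.getLast? = some x
      · rw [if_neg (by simp [h]), ih, h]
        simp [dedupFrom]
      · rw [if_pos (by simp [h]), ih, List.getLast?_concat]
        simp [dedupFrom, h]

theorem dedupFrom_spec (s : List String) : ∀ (p : Option String),
    s.Pairwise (· ≤ ·) → (∀ b ∈ s, ∀ a, p = some a → a ≤ b) →
    (dedupFrom p s).Pairwise (· < ·) ∧ (∀ a, a ∈ dedupFrom p s ↔ a ∈ s ∧ p ≠ some a) := by
  induction s with
  | nil => intro p _ _; simp [dedupFrom]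
  | cons x xs ih =>
      intro p hs hp
      have hx : ∀ b ∈ xs, x ≤ b := fun b hb => (List.pairwise_cons.mp hs).1 b hb
      have hxs : xs.Pairwise (· ≤ ·) := (List.pairwise_cons.mp hs).2
      by_cases h : p = some x
      · have ih' := ih p hxs (fun b hb a ha => by
          rw [h] at ha; cases ha; exact hx b hb)
        refine ⟨by simpa [dedupFrom, h] using ih'.1, fun a => ?_⟩
        rw [dedupFrom, if_pos h, ih'.2 a]
        constructor
        · rintro ⟨ha, hpa⟩; exact ⟨List.mem_cons_of_mem _ ha, hpa⟩
        · rintro ⟨ha, hpa⟩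
          rcases List.mem_cons.mp ha with rfl | ha
          · exact absurd h hpa
          · exact ⟨ha, hpa⟩
      · have ih' := ih (some x) hxs (fun b hb a ha => by
          cases ha; exact hx b hb)
        rw [dedupFrom, if_neg h]
        constructor
        · refine List.pairwise_cons.mpr ⟨fun b hb => ?_, ih'.1⟩
          obtain ⟨hbxs, hne⟩ := (ih'.2 b).mp hb
          exact lt_of_le_of_ne (hx b hbxs) (fun e => hne (by rw [e]))
        · intro a
          rw [List.mem_cons, ih'.2 a, List.mem_cons]
          constructor
          · rintro (rfl | ⟨ha, hne⟩)
            · exact ⟨Or.inl rfl, h⟩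
            · refine ⟨Or.inr ha, fun e => ?_⟩
              -- p = some a with a ∈ xs forces a = x, contradicting some x ≠ some a
              have hax : a ≤ x := hp x List.mem_cons_self a e
              have hxa : x ≤ a := hx a ha
              exact hne (by rw [le_antisymm hax hxa])
          · rintro ⟨rfl | ha, hpa⟩
            · exact Or.inl rfl
            · by_cases hxa : x = a
              · exact Or.inl hxa.symm
              · exact Or.inr ⟨ha, by simpa using hxa⟩

-- ===== VERDICT (by name: the statement is the Claim_ definition above) =====
theorem shopping_spec : Claim_equal_shopping := by
  intro g _
  show Spec_shopping g (shopping g)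
  have hinner : ∀ food : List String,
      food.foldl (fun tf i => tf ++ [pyTitle i]) [] = food.map pyTitle := fun food => by
    simpa using PySem.List.foldl_append_singleton_eq_map pyTitle food []
  have hA : shopping g = PySem.List.sorted
      (PySem.Set.ofList ((g.map Prod.snd).flatMap (fun foods => foods.map pyTitle)))
      (fun x => x) := by
    simp only [shopping, hinner]
    rw [PySem.List.foldl_append_eq_flatMap]
    simp
  have hB : shopping_alt g =
      dedupFrom none (PySem.List.sorted
        ((g.map Prod.snd).flatMap (fun foods => foods.map pyTitle)) (fun x => x)) := by
    simp only [shopping_alt]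
    rw [foldl_dedupFrom]
    simp
  show shopping g = shopping_alt g
  rw [hA, hB]
  set L := (g.map Prod.snd).flatMap (fun foods => foods.map pyTitle) with hL
  set s := PySem.List.sorted L (fun x => x) with hs
  have hpair : s.Pairwise (· ≤ ·) := PySem.List.sorted_pairwise L (fun x => x)
  have hspec := dedupFrom_spec s none hpair (by intro b _ a ha; cases ha)
  have hmemL : ∀ a, a ∈ s ↔ a ∈ L := fun a =>
    (PySem.List.sorted_perm L (fun x => x) false).mem_iff
  refine PySem.List.sorted_eq_of_perm_of_pairwise_lt (PySem.Set.ofList L)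
    (dedupFrom none s) (fun x => x) ?_ hspec.1
  refine (List.perm_ext_iff_of_nodup ?_ (PySem.Set.nodup_ofList L)).mpr ?_
  · exact hspec.1.imp (fun h => ne_of_lt h)
  · intro a
    rw [PySem.Set.mem_ofList, hspec.2 a, hmemL]
    simp
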